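-- pv_equiv track=rewrite | github.com/hustyichi/dify-rag | dify_rag/extractor/html/html_table.py | merge_same_first_column
-- ===== SOURCE A (Python) =====
-- def merge_same_first_column(data: list[list[str]]) -> list[list[str]]:
--     """Optimizes complex tables by merging cells with same first column value.
--
--     For rows that have the same value in their first column, merges those rows by:
--     - Keeping the first column value from the first row
--     - Concatenating values in other columns
--
--     Args:
--         data: A 2D list representing the table data
--
--     Returns:
--         A 2D list with merged rows where appropriate
--     """
--     result = []
--     i = 0
--     while i < len(data):
--         current_row = data[i]
--
--         # Check if next row exists and has same first column value
--         has_next = i + 1 < len(data)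
--         should_merge = i == 0 and has_next and data[i + 1][0] == current_row[0] and len(current_row) == len(data[i+1])
--
--         if should_merge:
--             next_row = data[i + 1]
--             merged_row = []
--
--             # Merge the two rows
--             for col in range(len(current_row)):
--                 if current_row[col] == next_row[col]:
--                     merged_row.append(current_row[col])
--                 else:
--                     merged_row.append(current_row[col] + " " + next_row[col])
--
--             result.append(merged_row)
--             i += 2  # Skip next row since it's been merged
--         else:
--             result.append(current_row)
--             i += 1
--
--     return result
-- ===== SOURCE B (Python) =====
-- def merge_same_first_column(data: list[list[str]]) -> list[list[str]]:
--     if len(data) >= 2 and data[1][0] == data[0][0] and len(data[0]) == len(data[1]):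
--         merged = [c if c == n else c + " " + n for c, n in zip(data[0], data[1])]
--         return [merged] + data[2:]
--     return list(data)
-- ===== Notes on version B (the rewrite author's own statement) =====
-- stated objective: simpler
-- what changed: Replaced the index-driven while loop (which can only ever merge at i==0) with a single upfront check on the first two rows, a zip-comprehension merge, and a slice for the rest.
import Mathlib
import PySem

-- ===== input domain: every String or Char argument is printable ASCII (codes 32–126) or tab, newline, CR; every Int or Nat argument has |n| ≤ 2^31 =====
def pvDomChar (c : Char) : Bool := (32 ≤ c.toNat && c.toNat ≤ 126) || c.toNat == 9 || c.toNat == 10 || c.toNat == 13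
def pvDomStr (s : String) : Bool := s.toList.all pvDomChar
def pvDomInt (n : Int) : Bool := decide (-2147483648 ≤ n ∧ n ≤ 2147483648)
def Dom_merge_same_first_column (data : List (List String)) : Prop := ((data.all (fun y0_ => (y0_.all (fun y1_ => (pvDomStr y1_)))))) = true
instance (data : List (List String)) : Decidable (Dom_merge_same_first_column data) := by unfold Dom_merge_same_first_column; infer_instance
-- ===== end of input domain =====

-- B replaces A's index-driven while loop (which can only merge at i == 0) with one
-- upfront check on the first two rows, a zip merge, and the rest of the list unchanged (objective: simpler).

-- ===== PORT A =====
-- while loop ported as structural recursion on the index i (measure data.length - i);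
-- data[i+1][0] / row accesses are guarded in Python (should_merge short-circuits, the inner
-- loop runs only under equal lengths), so the getD/headD defaults are exact under Pre_.
def mergeLoopA (data : List (List String)) (result : List (List String)) (i : Nat) :
    List (List String) :=
  if _h : i < data.length then
    let current_row := data.getD i []
    let has_next := i + 1 < data.length
    let should_merge := i == 0 && has_next &&
      (data.getD (i+1) []).headD "" == current_row.headD "" &&
      current_row.length == (data.getD (i+1) []).length
    if should_merge then
      let next_row := data.getD (i+1) []
      let merged_row := (List.range current_row.length).foldl
        (fun acc col =>
          if current_row.getD col "" == next_row.getD col "" then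
            acc ++ [current_row.getD col ""]
          else
            acc ++ [current_row.getD col "" ++ " " ++ next_row.getD col ""]) []
      mergeLoopA data (result ++ [merged_row]) (i + 2)
    else
      mergeLoopA data (result ++ [current_row]) (i + 1)
  else result
termination_by data.length - i

def merge_same_first_column (data : List (List String)) : List (List String) :=
  mergeLoopA data [] 0

-- ===== PORT B =====
def merge_same_first_column_alt (data : List (List String)) : List (List String) :=
  match data with
  | r0 :: r1 :: rest =>
    if r1.headD "" == r0.headD "" && r0.length == r1.length then
      ((r0.zip r1).map (fun cn => if cn.1 == cn.2 then cn.1 else cn.1 ++ " " ++ cn.2)) :: rest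
    else r0 :: r1 :: rest
  | other => other

-- ===== PRECONDITION & SPEC =====
-- Pre_ excludes exactly the inputs where Python A raises IndexError: at least two rows
-- with the first or the second row empty (data[1][0] / data[0][0]); Python B raises there too.
def Pre_merge_same_first_column (data : List (List String)) : Prop :=
  data.length < 2 ∨ (data.getD 0 [] ≠ [] ∧ data.getD 1 [] ≠ [])
instance (data : List (List String)) : Decidable (Pre_merge_same_first_column data) := by
  unfold Pre_merge_same_first_column; infer_instance
def pvWitness_merge_same_first_column : List (List String) := [["a", "x"], ["a", "y"], ["b"]]

def Spec_merge_same_first_column (data : List (List String)) (out : List (List String)) : Prop := out = merge_same_first_column_alt data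
instance (data : List (List String)) (out : List (List String)) : Decidable (Spec_merge_same_first_column data out) := by unfold Spec_merge_same_first_column; infer_instance

-- ===== CLAIM (what is proved, stated in full; the proofs are below) =====
def Claim_equal_merge_same_first_column : Prop := ∀ (data : List (List String)), Dom_merge_same_first_column data → Pre_merge_same_first_column data → Spec_merge_same_first_column data (merge_same_first_column data)

-- ===== LEMMAS AND PROOFS =====

-- Once i ≥ 1, should_merge is always false, so the loop just copies the remaining rows.
theorem mergeLoopA_tail (data : List (List String)) (result : List (List String)) (i : Nat)
    (hi : 1 ≤ i) : mergeLoopA data result i = result ++ data.drop i := by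
  rw [mergeLoopA]
  by_cases h : i < data.length
  · have hne : (i == 0) = false := beq_eq_false_iff_ne.mpr (by omega)
    simp only [h, dif_pos, hne, Bool.false_and, if_neg Bool.false_ne_true]
    rw [mergeLoopA_tail data _ (i + 1) (by omega)]
    rw [List.drop_eq_getElem_cons h, List.getD_eq_getElem data [] h]
    simp
  · simp [h, List.drop_eq_nil_of_le (by omega : data.length ≤ i)]
termination_by data.length - i

theorem foldl_range_ite {α : Type} (c : Nat → Bool) (x y : Nat → α) (n : Nat) (acc : List α) :
    (List.range n).foldl (fun a j => if c j then a ++ [x j] else a ++ [y j]) acc =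
      acc ++ (List.range n).map (fun j => if c j then x j else y j) := by
  induction n generalizing acc with
  | zero => simp
  | succ k ih => rw [List.range_succ]; by_cases h : c k <;> simp [ih, h]

theorem map_range_zip (r1 r2 : List String) (h : r1.length = r2.length) :
    (List.range r1.length).map (fun col =>
      if r1.getD col "" == r2.getD col "" then r1.getD col ""
      else r1.getD col "" ++ " " ++ r2.getD col "") =
    (r1.zip r2).map (fun cn => if cn.1 == cn.2 then cn.1 else cn.1 ++ " " ++ cn.2) := by
  induction r1 generalizing r2 with
  | nil => simp
  | cons a t ih =>
    cases r2 with
    | nil => simp at h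
    | cons b t2 =>
      simp only [List.length_cons, List.range_succ_eq_map, List.map_cons, List.map_map,
        List.zip_cons_cons]
      congr 1
      have := ih t2 (by simpa using h)
      simpa [Function.comp] using this

-- ===== VERDICT (by name: the statement is the Claim_ definition above) =====
theorem merge_same_first_column_spec : Claim_equal_merge_same_first_column := by
  intro data _hd _hpre
  unfold Spec_merge_same_first_column merge_same_first_column merge_same_first_column_alt
  match data with
  | [] => rw [mergeLoopA]; simp
  | [r] =>
    rw [mergeLoopA]
    simp only [List.length_cons, List.length_nil, Nat.lt_irrefl, zero_lt_one, dif_pos,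
      Nat.zero_add, decide_false, Bool.and_false, Bool.false_and,
      if_neg Bool.false_ne_true]
    rw [mergeLoopA_tail _ _ 1 (le_refl 1)]
    simp
  | r0 :: r1 :: rest =>
    rw [mergeLoopA]
    have hlt : 0 < (r0 :: r1 :: rest).length := by simp
    have h1 : 0 + 1 < (r0 :: r1 :: rest).length := by simp
    simp only [hlt, dif_pos, List.getD, List.getElem?_cons_zero, List.getElem?_cons_succ,
      Option.getD_some, beq_self_eq_true, Bool.true_and, h1, decide_true]
    by_cases hc : (r1.headD "" == r0.headD "" && r0.length == r1.length) = true
    · have hcond : (r1.headD "" == r0.headD "") = true ∧ (r0.length == r1.length) = true := by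
        simpa [Bool.and_eq_true] using hc
      have hlen : r0.length = r1.length := by simpa using hcond.2
      simp only [hcond.1, hcond.2, Bool.and_self, if_pos]
      rw [mergeLoopA_tail _ _ 2 (by omega)]
      simp only [← List.getD_eq_getElem?_getD]
      rw [foldl_range_ite (fun col => r0.getD col "" == r1.getD col "")
        (fun col => r0.getD col "") (fun col => r0.getD col "" ++ " " ++ r1.getD col "")
        r0.length []]
      rw [map_range_zip r0 r1 hlen]
      simp
    · have hc' : (r1.headD "" == r0.headD "" && r0.length == r1.length) = false := by
        simpa using hc
      rcases Bool.and_eq_false_iff.mp hc' with h' | h' <;>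
        simp only [h', Bool.false_and, Bool.and_false,
          if_neg Bool.false_ne_true] <;>
      · rw [mergeLoopA_tail _ _ 1 (by omega)]
        simp
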